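-- pv_equiv track=rewrite | github.com/juyongc/Up-Algorithms | PROG_최고의집합.py | solution
-- ===== SOURCE A (Python) =====
-- def solution(n, s):
--     answer = []
--     if 1*n > s:     # s가 1*n보다 작으면 불가능
--         answer.append(-1)
--     else:
--         # n만큼 반복
--         while n > 0:
--             if s % n == 0:      # 나머지가 0이면
--                 now = s // n
--             else:               # 나머지가 0이 아니면
--                 now = s//n + 1
--             s -= now
--             n -= 1
--             answer.append(now)
--     answer.sort()               # 오름차순 정리
--     return answer
-- ===== SOURCE B (Python) =====
-- def solution(n, s):
--     if n > s:
--         return [-1]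
--     if n <= 0:
--         return []
--     q, r = divmod(s, n)
--     return [q] * (n - r) + [q + 1] * r
-- ===== Notes on version B (the rewrite author's own statement) =====
-- stated objective: faster
-- what changed: Replaces the n-step greedy loop plus final sort with a closed formula: (n - s%n) copies of s//n followed by s%n copies of s//n+1, emitted already in ascending order.
import Mathlib
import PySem

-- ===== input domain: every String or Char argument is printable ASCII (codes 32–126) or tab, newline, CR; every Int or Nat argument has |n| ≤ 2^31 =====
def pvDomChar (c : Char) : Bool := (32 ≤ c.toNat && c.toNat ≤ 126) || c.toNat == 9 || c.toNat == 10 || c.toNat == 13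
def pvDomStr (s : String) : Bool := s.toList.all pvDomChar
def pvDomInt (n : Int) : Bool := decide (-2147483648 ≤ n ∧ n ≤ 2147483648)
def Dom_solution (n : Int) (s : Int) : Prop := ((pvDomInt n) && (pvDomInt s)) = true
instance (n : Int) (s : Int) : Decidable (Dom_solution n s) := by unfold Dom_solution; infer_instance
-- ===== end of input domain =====

-- B replaces A's n-step greedy loop + final sort by the closed formula
-- (n - s%n) copies of s//n followed by s%n copies of s//n+1, already ascending (objective: faster).


-- ===== PORT A =====
-- the 'while n > 0' loop of A; fuel = n.toNat (n decreases by exactly 1 per iteration)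
def solLoop : Nat → Int → List Int → List Int
  | 0, _, acc => acc
  | Nat.succ m, s, acc =>
    let n : Int := (m : Int) + 1
    let now : Int := if PySem.Int.mod s n = 0 then PySem.Int.floordiv s n
                     else PySem.Int.floordiv s n + 1
    solLoop m (s - now) (acc ++ [now])

def solution (n : Int) (s : Int) : List Int :=
  if 1 * n > s then
    PySem.List.sorted ([] ++ [(-1 : Int)]) (fun x => x) false
  else
    PySem.List.sorted (solLoop n.toNat s []) (fun x => x) false

-- ===== PORT B =====
def solution_alt (n : Int) (s : Int) : List Int :=
  if n > s then [-1]
  else if n ≤ 0 then []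
  else
    let q := PySem.Int.floordiv s n
    let r := PySem.Int.mod s n
    List.replicate (n - r).toNat q ++ List.replicate r.toNat (q + 1)

-- ===== PRECONDITION & SPEC =====
def Spec_solution (n : Int) (s : Int) (out : List Int) : Prop := out = solution_alt n s
instance (n : Int) (s : Int) (out : List Int) : Decidable (Spec_solution n s out) := by unfold Spec_solution; infer_instance

-- ===== CLAIM (what is proved, stated in full; the proofs are below) =====
def Claim_equal_solution : Prop := ∀ (n : Int) (s : Int), Dom_solution n s → Spec_solution n s (solution n s)

-- ===== LEMMAS AND PROOFS =====

-- the loop accumulator only ever grows on the right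
theorem solLoop_acc (k : Nat) : ∀ (s : Int) (acc : List Int),
    solLoop k s acc = acc ++ solLoop k s [] := by
  induction k with
  | zero => intro s acc; simp [solLoop]
  | succ m ih =>
    intro s acc
    simp only [solLoop]
    conv_rhs => rw [ih]
    rw [ih]
    simp

-- one loop step, in ediv/emod form: taking ceil(s/(d+1)) first leaves the two-block shape intact
theorem blocks_step (d s now : Int) (hd : 0 < d)
    (hnow : now = if s % (d + 1) = 0 then s / (d + 1) else s / (d + 1) + 1) :
    now :: (List.replicate ((s - now) % d).toNat ((s - now) / d + 1)
          ++ List.replicate (d - (s - now) % d).toNat ((s - now) / d))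
    = List.replicate (s % (d + 1)).toNat (s / (d + 1) + 1)
        ++ List.replicate (d + 1 - s % (d + 1)).toNat (s / (d + 1)) := by
  have h0 : (0:Int) < d + 1 := by omega
  have hqr : (d + 1) * (s / (d + 1)) + s % (d + 1) = s := Int.mul_ediv_add_emod s (d + 1)
  have hr0 : 0 ≤ s % (d + 1) := Int.emod_nonneg s (by omega)
  have hrlt : s % (d + 1) < d + 1 := Int.emod_lt_of_pos s h0
  by_cases hz : s % (d + 1) = 0
  · rw [hnow, if_pos hz]
    have h1 : s - s / (d + 1) = s / (d + 1) * d := by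
      rw [hz] at hqr; ring_nf; ring_nf at hqr; linarith
    have h2 : (s - s / (d + 1)) % d = 0 := by rw [h1]; exact Int.mul_emod_left _ _
    have h3 : (s - s / (d + 1)) / d = s / (d + 1) := by
      rw [h1]; exact Int.mul_ediv_cancel _ (by omega)
    have e2 : ((d : Int) - 0).toNat = d.toNat := by omega
    have e3 : ((d : Int) + 1 - 0).toNat = d.toNat + 1 := by omega
    rw [h2, h3, hz, e2, e3, List.replicate_succ]
    simp
  · rw [hnow, if_neg hz]
    have h1 : s - (s / (d + 1) + 1) = (s % (d + 1) - 1) + d * (s / (d + 1)) := by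
      ring_nf; ring_nf at hqr; linarith
    have h2 : (s - (s / (d + 1) + 1)) % d = s % (d + 1) - 1 := by
      rw [h1, Int.add_mul_emod_self_left]; exact Int.emod_eq_of_lt (by omega) (by omega)
    have h3 : (s - (s / (d + 1) + 1)) / d = s / (d + 1) := by
      rw [h1, Int.add_mul_ediv_left _ _ (by omega : d ≠ 0),
        Int.ediv_eq_zero_of_lt (by omega) (by omega), zero_add]
    rw [h2, h3]
    have e1 : (s % (d + 1)).toNat = (s % (d + 1) - 1).toNat + 1 := by omega
    have e2 : ((d : Int) + 1 - s % (d + 1)).toNat = (d - (s % (d + 1) - 1)).toNat := by omega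
    rw [e1, e2, List.replicate_succ]
    simp

-- closed form of A's loop: the s%n ceilings come out first, then the s//n floors
theorem solLoop_closed (k : Nat) : ∀ s : Int,
    solLoop (k + 1) s [] =
      List.replicate (PySem.Int.mod s ((k : Int) + 1)).toNat
          (PySem.Int.floordiv s ((k : Int) + 1) + 1)
        ++ List.replicate (((k : Int) + 1) - PySem.Int.mod s ((k : Int) + 1)).toNat
          (PySem.Int.floordiv s ((k : Int) + 1)) := by
  induction k with
  | zero =>
    intro s
    norm_num [solLoop]
  | succ k ih =>
    intro s
    rw [solLoop]
    rw [solLoop_acc, ih]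
    push_cast
    have hd : (0:Int) < (k : Int) + 1 := by omega
    simp only [PySem.Int.mod_eq_emod_of_pos (show (0:Int) < (k : Int) + 1 + 1 by omega),
               PySem.Int.floordiv_eq_ediv_of_pos (show (0:Int) < (k : Int) + 1 + 1 by omega),
               PySem.Int.mod_eq_emod_of_pos hd, PySem.Int.floordiv_eq_ediv_of_pos hd,
               List.nil_append, List.singleton_append]
    exact blocks_step ((k : Int) + 1) s _ hd rfl

-- A's final sort turns the descending two-block list into the ascending one B builds directly
theorem sorted_two_blocks (a b : Nat) (q : Int) :
    PySem.List.sorted (List.replicate a (q + 1) ++ List.replicate b q) (fun x => x) false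
      = List.replicate b q ++ List.replicate a (q + 1) := by
  apply PySem.List.sorted_id_eq_of_perm_of_pairwise
  · exact List.perm_append_comm
  · apply List.pairwise_append.mpr
    refine ⟨List.pairwise_replicate.mpr (by simp), List.pairwise_replicate.mpr (by simp), ?_⟩
    intro x hx y hy
    rw [List.eq_of_mem_replicate hx, List.eq_of_mem_replicate hy]
    omega

-- ===== VERDICT (by name: the statement is the Claim_ definition above) =====
theorem solution_spec : Claim_equal_solution := by
  intro n s _
  unfold Spec_solution solution solution_alt
  rw [one_mul]
  by_cases h1 : n > s
  · simp only [if_pos h1]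
    decide
  · simp only [if_neg h1]
    by_cases h2 : n ≤ 0
    · have : n.toNat = 0 := by omega
      simp [h2, this, solLoop, PySem.List.sorted]
    · have hk : ∃ k : Nat, n = (k : Int) + 1 := ⟨n.toNat - 1, by omega⟩
      obtain ⟨k, rfl⟩ := hk
      have ht : ((k : Int) + 1).toNat = k + 1 := by omega
      rw [if_neg h2, ht, solLoop_closed k s, sorted_two_blocks]
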